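-- pv_equiv track=rewrite | github.com/JFlashy96/Algorithms | CodeSignal/absoluteValuesSumMinimization.py | solution
-- ===== SOURCE A (Python) =====
-- def solution(a):
-- 	min_sum = float('inf')
-- 	found_elem = 0
-- 	for i in range(0, len(a)):
-- 		elem_sum = 0
-- 		for j in range(0, len(a)):
-- 			elem_sum += abs(j-i)
-- 		if elem_sum < min_sum:
-- 			min_sum = elem_sum
-- 			found_elem = a[i]
-- 	return found_elem
-- ===== SOURCE B (Python) =====
-- def solution(a):
--     # The inner distance sum depends only on the index, and is minimized
--     # (first) at the lower median index (n-1)//2; empty input gives 0.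
--     return a[(len(a) - 1) // 2] if a else 0
-- ===== Notes on version B (the rewrite author's own statement) =====
-- stated objective: faster
-- what changed: Replaces the quadratic double loop with a direct O(1) lookup of the lower-median index (n-1)//2, which provably minimizes the index-distance sum first.
import Mathlib
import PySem

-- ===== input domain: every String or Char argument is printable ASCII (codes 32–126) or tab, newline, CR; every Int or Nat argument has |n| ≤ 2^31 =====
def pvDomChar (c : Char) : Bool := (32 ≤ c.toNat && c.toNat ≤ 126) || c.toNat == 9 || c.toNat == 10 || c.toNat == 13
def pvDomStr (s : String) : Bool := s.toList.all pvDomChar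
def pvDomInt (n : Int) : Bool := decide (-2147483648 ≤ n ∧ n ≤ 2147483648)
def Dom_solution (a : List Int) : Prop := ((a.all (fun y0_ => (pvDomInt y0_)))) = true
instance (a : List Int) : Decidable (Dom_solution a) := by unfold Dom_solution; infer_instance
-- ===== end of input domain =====

-- B replaces A's O(n^2) double loop by a direct O(1) lookup at the lower-median index (n-1)//2.

-- ===== PORT A =====
-- inner loop: elem_sum = sum of abs(j - i) for j in range(0, n)
def innerSum (n : Int) (i : Int) : Int :=
  (PySem.List.pyRange 0 n).foldl (fun s j => s + |j - i|) 0

-- loop body; min_sum is modelled as Option Int with none = float('inf')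
def stepA (a : List Int) (st : Option Int × Int) (i : Int) : Option Int × Int :=
  let elemSum := innerSum (a.length : Int) i
  match st.1 with
  | none => (some elemSum, PySem.List.pyGetD a i 0)   -- i is always in range here
  | some m => if elemSum < m then (some elemSum, PySem.List.pyGetD a i 0) else st

def solution (a : List Int) : Int :=
  ((PySem.List.pyRange 0 (a.length : Int)).foldl (stepA a) (none, 0)).2

-- ===== PORT B =====
def solution_alt (a : List Int) : Int :=
  if a.isEmpty then 0 else a.getD ((a.length - 1) / 2) 0

-- ===== PRECONDITION & SPEC =====
def Spec_solution (a : List Int) (out : Int) : Prop := out = solution_alt a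
instance (a : List Int) (out : Int) : Decidable (Spec_solution a out) := by unfold Spec_solution; infer_instance

-- ===== CLAIM (what is proved, stated in full; the proofs are below) =====
def Claim_equal_solution : Prop := ∀ (a : List Int), Dom_solution a → Spec_solution a (solution a)

-- ===== LEMMAS AND PROOFS =====

-- peel the last index off the inner loop
theorem innerSum_succ (n : Nat) (i : Int) :
    innerSum ((n : Int) + 1) i = innerSum (n : Int) i + |(n : Int) - i| := by
  unfold innerSum
  rw [PySem.List.pyRange_one_succ_right (by positivity), List.foldl_append]
  rfl

-- closed form for i ≥ n
theorem innerSum_ge (n : Nat) (i : Int) (h : (n : Int) ≤ i) :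
    2 * innerSum (n : Int) i = n * (2 * i - n + 1) := by
  induction n with
  | zero => simp [innerSum, PySem.List.pyRange_one_eq_nil le_rfl]
  | succ n ih =>
      have hn : (n : Int) ≤ i := by push_cast at h ⊢; omega
      have habs : |(n : Int) - i| = i - n := by rw [abs_sub_comm]; exact abs_of_nonneg (by omega)
      have hs := innerSum_succ n i
      push_cast
      push_cast at hs
      rw [hs, habs]
      linear_combination ih hn

-- closed form for i < n (times 2, to stay division-free)
theorem innerSum_lt (n i : Nat) (h : i < n) :
    2 * innerSum (n : Int) (i : Int) =
      (i : Int) * (i + 1) + ((n : Int) - 1 - i) * ((n : Int) - i) := by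
  induction n with
  | zero => omega
  | succ n ih =>
      have hs := innerSum_succ n (i : Int)
      push_cast at hs
      push_cast
      rw [hs]
      by_cases hin : i < n
      · have habs : |(n : Int) - i| = (n : Int) - i := abs_of_nonneg (by omega)
        rw [habs]
        have := ih hin
        push_cast at this
        linear_combination this
      · have hieq : i = n := by omega
        subst hieq
        have habs : |(i : Int) - i| = 0 := by simp
        rw [habs]
        have := innerSum_ge i (i : Int) le_rfl
        linear_combination this

-- difference of consecutive inner sums
theorem innerSum_diff (n i : Nat) (h : i + 1 < n) :
    2 * innerSum (n : Int) ((i : Int) + 1) =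
      2 * innerSum (n : Int) (i : Int) + 2 * (2 * (i : Int) + 2 - n) := by
  have h1 := innerSum_lt n i (by omega)
  have h2 := innerSum_lt n (i + 1) (by omega)
  push_cast at h2
  linear_combination h2 - h1

-- strictly decreasing up to the lower median
theorem innerSum_dec (n i : Nat) (h : 2 * i + 3 ≤ n) :
    innerSum (n : Int) ((i : Int) + 1) < innerSum (n : Int) (i : Int) := by
  have hd := innerSum_diff n i (by omega)
  have hn : (2 : Int) * i + 3 ≤ n := by omega
  linarith

-- never dips below the value at the lower median afterwards
theorem innerSum_min_le (n i : Nat) (h1 : (n - 1) / 2 ≤ i) (h2 : i < n) :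
    innerSum (n : Int) (((n - 1) / 2 : Nat) : Int) ≤ innerSum (n : Int) (i : Int) := by
  induction i with
  | zero =>
      have : (n - 1) / 2 = 0 := by omega
      rw [this]
  | succ i ih =>
      by_cases hm : (n - 1) / 2 ≤ i
      · have hprev := ih hm (by omega)
        have hd := innerSum_diff n i (by omega)
        have hn : (0 : Int) ≤ 2 * (i : Int) + 2 - n := by
          have : n ≤ 2 * i + 2 := by omega
          omega
        push_cast at hprev hd ⊢
        linarith
      · have : i + 1 = (n - 1) / 2 := by omega
        rw [← this]

-- the main loop invariant: after the first k iterations the state holds the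
-- minimal inner sum seen so far and the element at its (first) index
theorem loop_inv (a : List Int) (k : Nat) (hk : 1 ≤ k) (hkn : k ≤ a.length) :
    (PySem.List.pyRange 0 (k : Int)).foldl (stepA a) (none, 0) =
      (some (innerSum (a.length : Int) ((min (k - 1) ((a.length - 1) / 2) : Nat) : Int)),
       a.getD (min (k - 1) ((a.length - 1) / 2)) 0) := by
  induction k with
  | zero => omega
  | succ k ih =>
      by_cases hk1 : k = 0
      · subst hk1
        have h01 : PySem.List.pyRange 0 ((1 : Nat) : Int) = [0] := by
          simpa using PySem.List.pyRange_one_singleton (a := 0)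
        rw [h01]
        simp only [List.foldl_cons, List.foldl_nil, stepA]
        have hg : PySem.List.pyGetD a 0 0 = a.getD 0 0 := by
          simpa using PySem.List.pyGetD_natCast a 0 0
        simp [hg]
      · have hk' : 1 ≤ k := by omega
        have hkn' : k ≤ a.length := by omega
        have hsplit : PySem.List.pyRange 0 ((k : Int) + 1) =
            PySem.List.pyRange 0 (k : Int) ++ [(k : Int)] :=
          PySem.List.pyRange_one_succ_right (by positivity)
        have hc : ((k + 1 : Nat) : Int) = (k : Int) + 1 := by push_cast; ring
        rw [hc, hsplit, List.foldl_append, ih hk' hkn']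
        simp only [List.foldl_cons, List.foldl_nil, stepA]
        set n := a.length with hn
        set m := (n - 1) / 2 with hm
        by_cases hkm : k ≤ m
        · -- still descending: update fires
          have hmin1 : min (k - 1) m = k - 1 := by omega
          have hmin2 : min (k + 1 - 1) m = k := by omega
          have hdec : innerSum (n : Int) ((k : Int)) <
              innerSum (n : Int) ((min (k - 1) m : Nat) : Int) := by
            rw [hmin1]
            have hb : 2 * (k - 1) + 3 ≤ n := by omega
            have := innerSum_dec n (k - 1) hb
            have hc : ((k - 1 : Nat) : Int) + 1 = (k : Int) := by omega
            rwa [hc] at this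
          rw [hmin2]
          simp only [if_pos hdec]
          have hg : PySem.List.pyGetD a (k : Int) 0 = a.getD k 0 :=
            PySem.List.pyGetD_natCast a k 0
          rw [hg]
        · -- past the median: the minimum is kept
          have hmin1 : min (k - 1) m = m := by omega
          have hmin2 : min (k + 1 - 1) m = m := by omega
          have hle : innerSum (n : Int) ((min (k - 1) m : Nat) : Int) ≤
              innerSum (n : Int) ((k : Int)) := by
            rw [hmin1]
            exact innerSum_min_le n k (by omega) (by omega)
          rw [hmin2]
          simp only [if_neg (not_lt.mpr hle)]
          rw [hmin1]

-- ===== VERDICT (by name: the statement is the Claim_ definition above) =====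
theorem solution_spec : Claim_equal_solution := by
  intro a _
  unfold Spec_solution solution solution_alt
  rcases a with _ | ⟨x, t⟩
  · simp [PySem.List.pyRange_one_eq_nil]
  · have hlen : 1 ≤ (x :: t).length := by simp
    have h := loop_inv (x :: t) (x :: t).length hlen le_rfl
    rw [h]
    have hmin : min ((x :: t).length - 1) (((x :: t).length - 1) / 2) =
        ((x :: t).length - 1) / 2 := by omega
    rw [hmin]
    simp
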